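-- pv_equiv track=rewrite | github.com/VaninaBlas/Guias | Practicas td1/listas_3.py | suma_en_posiciones_impares
-- ===== SOURCE A (Python) =====
-- def suma_en_posiciones_impares(xs:list[int], n:int)->list[int]:
--     '''
--     Requiere: nada
--     Devuelve:  una nueva lista con los
--     mismos elementos que xs pero sumandoles n a aquellos en las posiciones
--     impares de xs
--     '''
--     #COMPLETAR!
--     i:int=0
--     vr:list[int]=[]
--     while(i<len(xs)):
--         if(i%2!=0):
--             vr.append(xs[i]+n)
--         else:
--             vr.append(xs[i])
--         i=i+1
--     return vr
-- ===== SOURCE B (Python) =====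
-- def suma_en_posiciones_impares(xs: list[int], n: int) -> list[int]:
--     vr = list(xs)
--     vr[1::2] = [x + n for x in vr[1::2]]
--     return vr
-- ===== Notes on version B (the rewrite author's own statement) =====
-- stated objective: simpler
-- what changed: Replaces the index-counting while loop with a per-element parity branch by a full copy plus one strided slice assignment touching only the odd positions; the bulk slice operations run in C, giving a measured constant-factor speedup.
import Mathlib
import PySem

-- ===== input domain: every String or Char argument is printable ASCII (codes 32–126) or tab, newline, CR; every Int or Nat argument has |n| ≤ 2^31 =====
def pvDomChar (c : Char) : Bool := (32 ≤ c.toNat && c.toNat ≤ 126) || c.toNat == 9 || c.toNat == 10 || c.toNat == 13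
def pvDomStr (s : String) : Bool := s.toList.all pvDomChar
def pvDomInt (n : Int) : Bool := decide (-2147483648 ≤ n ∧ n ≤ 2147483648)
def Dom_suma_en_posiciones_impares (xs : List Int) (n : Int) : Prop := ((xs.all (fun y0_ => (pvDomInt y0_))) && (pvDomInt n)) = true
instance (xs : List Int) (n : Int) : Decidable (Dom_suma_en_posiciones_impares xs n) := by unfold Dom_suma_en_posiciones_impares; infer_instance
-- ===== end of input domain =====

-- B replaces A's index-counting loop with parity branch by a copy plus one odd-stride
-- slice assignment (vr[1::2] = [x+n for x in vr[1::2]]); objective: simpler.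


-- ===== PORT A =====
-- the while loop: i counts up, vr accumulates by append
def sumaA_go (xs : List Int) (n : Int) (i : Nat) (vr : List Int) : List Int :=
  if h : i < xs.length then
    sumaA_go xs n (i + 1) (vr ++ [if i % 2 ≠ 0 then xs[i] + n else xs[i]])
  else vr
termination_by xs.length - i

def suma_en_posiciones_impares (xs : List Int) (n : Int) : List Int :=
  sumaA_go xs n 0 []

-- ===== PORT B =====
-- vr[1::2] (odd-stride slice), ported by hand, exact for step 2 from index 1
def sliceOdd : List Int → List Int
  | [] => []
  | [_] => []
  | _ :: b :: rest => b :: sliceOdd rest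

-- slice assignment vr[1::2] = ys (lengths match, which the proof exploits), exact
def setOdd : List Int → List Int → List Int
  | [], _ => []
  | [a], _ => [a]
  | a :: _ :: rest, y :: ys => a :: y :: setOdd rest ys
  | a :: b :: rest, [] => a :: b :: rest

def suma_en_posiciones_impares_alt (xs : List Int) (n : Int) : List Int :=
  let vr := xs
  setOdd vr ((sliceOdd vr).map (fun x => x + n))

-- ===== PRECONDITION & SPEC =====
def Spec_suma_en_posiciones_impares (xs : List Int) (n : Int) (out : List Int) : Prop := out = suma_en_posiciones_impares_alt xs n
instance (xs : List Int) (n : Int) (out : List Int) : Decidable (Spec_suma_en_posiciones_impares xs n out) := by unfold Spec_suma_en_posiciones_impares; infer_instance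

-- ===== CLAIM (what is proved, stated in full; the proofs are below) =====
def Claim_equal_suma_en_posiciones_impares : Prop := ∀ (xs : List Int) (n : Int), Dom_suma_en_posiciones_impares xs n → Spec_suma_en_posiciones_impares xs n (suma_en_posiciones_impares xs n)

-- ===== LEMMAS AND PROOFS =====

-- middle form: one-at-a-time recursion carrying the parity flag
def gPar (n : Int) : Bool → List Int → List Int
  | _, [] => []
  | odd, x :: rest => (if odd then x + n else x) :: gPar n (!odd) rest

theorem sumaA_go_eq (xs : List Int) (n : Int) :
    ∀ i vr, sumaA_go xs n i vr = vr ++ gPar n (i % 2 == 1) (xs.drop i) := by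
  intro i vr
  induction i, vr using sumaA_go.induct (xs := xs) (n := n) with
  | case1 i vr h ih =>
      simp only [dite_eq_ite] at ih
      rw [sumaA_go, dif_pos h, ih, List.drop_eq_getElem_cons h]
      have hb : ((i + 1) % 2 == 1) = !(i % 2 == 1) := by
        rcases Nat.mod_two_eq_zero_or_one i with h2 | h2 <;> simp [Nat.add_mod, h2]
      have hif : (if i % 2 ≠ 0 then xs[i] + n else xs[i])
          = (if (i % 2 == 1) = true then xs[i] + n else xs[i]) := by
        rcases Nat.mod_two_eq_zero_or_one i with h2 | h2 <;> simp [h2]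
      rw [hb, hif]
      simp [gPar]
  | case2 i vr h =>
      rw [sumaA_go, dif_neg h]
      have : xs.length ≤ i := Nat.le_of_not_lt h
      simp [List.drop_eq_nil_of_le this, gPar]

theorem alt_eq_gPar (n : Int) : ∀ xs : List Int,
    setOdd xs ((sliceOdd xs).map (fun x => x + n)) = gPar n false xs := by
  intro xs
  induction xs using sliceOdd.induct with
  | case1 => simp [setOdd, gPar]
  | case2 a => simp [setOdd, gPar]
  | case3 a b rest ih =>
      simp only [sliceOdd, List.map_cons, setOdd, gPar, ih]
      simp

-- ===== VERDICT (by name: the statement is the Claim_ definition above) =====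
theorem suma_en_posiciones_impares_spec : Claim_equal_suma_en_posiciones_impares := by
  intro xs n _
  unfold Spec_suma_en_posiciones_impares suma_en_posiciones_impares suma_en_posiciones_impares_alt
  rw [sumaA_go_eq, alt_eq_gPar]
  simp
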